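-- pv_equiv track=rewrite | github.com/Kpeti962/alga | Feladatok/Keresés/Count-Luck.py | countLuck
-- ===== SOURCE A (Python) =====
-- def countLuck(matrix, k):
--     n = len(matrix)
--     m = len(matrix[0])
--
--     start = None
--     cel = None
--     for x in range(n):
--         for y in range(m):
--             if matrix[x][y] == 'M':
--                 start = (x, y)
--             elif matrix[x][y] == '*':
--                 cel = (x, y)
--
--     ugrasok = [(-1, 0), (1, 0), (0, -1), (0, 1)]
--
--
--     def joLepes(x, y):
--         return 0 <= x < n and 0 <= y < m and matrix[x][y] in ('.', '*')
--
--
--     def bejaras(x, y, visited):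
--         if (x, y) == cel:
--             return 0
--
--         visited.add((x, y))
--
--         lehetosegek = 0
--         for dx, dy in ugrasok:
--             nx, ny = x + dx, y + dy
--             if joLepes(nx, ny) and (nx, ny) not in visited:
--                 lehetosegek += 1
--
--         dontesek = 1 if lehetosegek > 1 else 0
--
--         for dx, dy in ugrasok:
--             nx, ny = x + dx, y + dy
--             if joLepes(nx, ny) and (nx, ny) not in visited:
--                 dontesek += bejaras(nx, ny, visited)
--
--         return dontesek
--
--     dontesekSzama = bejaras(start[0], start[1], set())
--
--     return "Impressed" if dontesekSzama == k else "Oops!"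
-- ===== SOURCE B (Python) =====
-- def countLuck(matrix, k):
--     # Iterative DFS with an explicit stack (mark-on-pop, reversed pushes) instead of A's recursion.
--     n = len(matrix)
--     m = len(matrix[0])
--
--     start = None
--     cel = None
--     for x in range(n):
--         for y in range(m):
--             if matrix[x][y] == 'M':
--                 start = (x, y)
--             elif matrix[x][y] == '*':
--                 cel = (x, y)
--
--     def joLepes(x, y):
--         return 0 <= x < n and 0 <= y < m and matrix[x][y] in ('.', '*')
--
--     visited = set()
--     total = 0
--     stack = [start]
--     while stack:
--         x, y = stack.pop()
--         if (x, y) == cel: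
--             continue
--         if (x, y) in visited:
--             continue
--         visited.add((x, y))
--         nbrs = [(x + dx, y + dy) for dx, dy in [(-1, 0), (1, 0), (0, -1), (0, 1)]
--                 if joLepes(x + dx, y + dy) and (x + dx, y + dy) not in visited]
--         if len(nbrs) > 1:
--             total += 1
--         for nb in reversed(nbrs):
--             stack.append(nb)
--     return "Impressed" if total == k else "Oops!"
-- ===== Notes on version B (the rewrite author's own statement) =====
-- stated objective: alternative
-- what changed: Replaces A's recursive DFS (bejaras) with an iterative DFS using an explicit stack: cells are marked on pop, valid unvisited neighbors are counted at pop time and pushed in reversed order so the visit sequence matches A's pre-order recursion.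
import Mathlib
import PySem

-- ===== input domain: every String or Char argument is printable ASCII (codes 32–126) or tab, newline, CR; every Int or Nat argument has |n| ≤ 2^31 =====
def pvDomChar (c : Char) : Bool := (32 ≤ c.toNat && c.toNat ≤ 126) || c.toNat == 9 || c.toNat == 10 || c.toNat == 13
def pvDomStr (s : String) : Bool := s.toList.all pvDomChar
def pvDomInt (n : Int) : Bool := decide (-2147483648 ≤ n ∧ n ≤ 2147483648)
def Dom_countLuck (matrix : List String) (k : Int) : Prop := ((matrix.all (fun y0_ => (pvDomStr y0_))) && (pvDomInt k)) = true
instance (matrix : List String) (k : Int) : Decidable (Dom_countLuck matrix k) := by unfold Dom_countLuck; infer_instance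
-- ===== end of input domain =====

-- B replaces A's recursive DFS by an iterative DFS with an explicit stack (mark-on-pop,
-- reversed pushes), same return value; objective: alternative decomposition.

-- ===== PORT A =====
def aCell (matrix : List String) (x y : Int) : Char :=
  PySem.List.pyGetD (PySem.List.pyGetD matrix x "").toList y ' '

def aJo (matrix : List String) (n m x y : Int) : Bool :=
  decide (0 ≤ x) && decide (x < n) && decide (0 ≤ y) && decide (y < m) &&
  (aCell matrix x y == '.' || aCell matrix x y == '*')

def aUgr : List (Int × Int) := [(-1, 0), (1, 0), (0, -1), (0, 1)]

def aScan (matrix : List String) (n m : Int) : Option (Int × Int) × Option (Int × Int) :=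
  (PySem.List.pyRange 0 n 1).foldl (fun st x =>
    (PySem.List.pyRange 0 m 1).foldl (fun st2 y =>
      if aCell matrix x y == 'M' then (some (x, y), st2.2)
      else if aCell matrix x y == '*' then (st2.1, some (x, y)) else st2) st) (none, none)

def aBej (matrix : List String) (n m : Int) (cel : Option (Int × Int)) :
    Nat → Int → Int → PySem.Set (Int × Int) → Int × PySem.Set (Int × Int)
  | 0, _, _, v => (0, v)      -- fuel guard; the chosen fuel n*m+1 is never exhausted
  | f + 1, x, y, v =>
    if some (x, y) = cel then (0, v)
    else
      let v1 := PySem.Set.add v (x, y)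
      let lehet : Int := aUgr.foldl (fun acc d =>
        if aJo matrix n m (x + d.1) (y + d.2) && !(PySem.Set.contains v1 (x + d.1, y + d.2))
        then acc + 1 else acc) 0
      aUgr.foldl (fun st d =>
        if aJo matrix n m (x + d.1) (y + d.2) && !(PySem.Set.contains st.2 (x + d.1, y + d.2))
        then
          let r := aBej matrix n m cel f (x + d.1) (y + d.2) st.2
          (st.1 + r.1, r.2)
        else st) ((if 1 < lehet then (1 : Int) else 0), v1)

def countLuck (matrix : List String) (k : Int) : String :=
  match matrix with
  | [] => "Oops!"             -- Python raises IndexError here (outside Pre_)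
  | row0 :: _ =>
    let n : Int := matrix.length
    let m : Int := row0.toList.length
    let sc := aScan matrix n m
    match sc.1 with
    | none => "Oops!"         -- Python raises TypeError here (outside Pre_)
    | some s =>
      let d := (aBej matrix n m sc.2 (n.toNat * m.toNat + 1) s.1 s.2 PySem.Set.empty).1
      if d = k then "Impressed" else "Oops!"

-- ===== PORT B =====
def bCell (matrix : List String) (x y : Int) : Char :=
  PySem.List.pyGetD (PySem.List.pyGetD matrix x "").toList y ' '

def bJo (matrix : List String) (n m x y : Int) : Bool :=
  decide (0 ≤ x) && decide (x < n) && decide (0 ≤ y) && decide (y < m) &&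
  (bCell matrix x y == '.' || bCell matrix x y == '*')

def bScan (matrix : List String) (n m : Int) : Option (Int × Int) × Option (Int × Int) :=
  (PySem.List.pyRange 0 n 1).foldl (fun st x =>
    (PySem.List.pyRange 0 m 1).foldl (fun st2 y =>
      if bCell matrix x y == 'M' then (some (x, y), st2.2)
      else if bCell matrix x y == '*' then (st2.1, some (x, y)) else st2) st) (none, none)

-- termination measure for the stack loop (proof-side; cited by bLoop's decreasing_by)
def bGrid (n m : Int) : List (Int × Int) :=
  (PySem.List.pyRange 0 n 1).flatMap (fun i => (PySem.List.pyRange 0 m 1).map (fun j => (i, j)))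

def bFree (n m : Int) (v : PySem.Set (Int × Int)) : Nat :=
  ((bGrid n m).filter (fun c => !(PySem.Set.contains v c))).length

theorem mem_bGrid (n m : Int) (c : Int × Int) :
    c ∈ bGrid n m ↔ 0 ≤ c.1 ∧ c.1 < n ∧ 0 ≤ c.2 ∧ c.2 < m := by
  obtain ⟨x, y⟩ := c
  simp only [bGrid, List.mem_flatMap, List.mem_map, Prod.mk.injEq, PySem.List.mem_pyRange_one]
  constructor
  · rintro ⟨i, hi, j, hj, rfl, rfl⟩; omega
  · rintro ⟨h1, h2, h3, h4⟩; exact ⟨x, by omega, y, by omega, rfl, rfl⟩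

theorem pvFilterLenMono {α : Type} {p q : α → Bool} (l : List α)
    (h : ∀ a ∈ l, q a = true → p a = true) :
    (l.filter q).length ≤ (l.filter p).length := by
  induction l with
  | nil => simp
  | cons a l ih =>
    have ih' := ih (fun a ha => h a (List.mem_cons_of_mem _ ha))
    have ha := h a (List.mem_cons_self ..)
    simp only [List.filter_cons]
    cases hq : q a
    · cases hp : p a <;> simp <;> omega
    · rw [ha hq]; simp; omega

theorem pvFilterLenStrict {α : Type} {p q : α → Bool} (l : List α) (x : α)
    (hx : x ∈ l) (hp : p x = true) (hq : q x = false)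
    (h : ∀ a ∈ l, q a = true → p a = true) :
    (l.filter q).length < (l.filter p).length := by
  induction l with
  | nil => cases hx
  | cons a l ih =>
    have hmono := pvFilterLenMono l (fun a ha => h a (List.mem_cons_of_mem _ ha))
    simp only [List.filter_cons]
    rcases List.mem_cons.1 hx with rfl | hx'
    · rw [hp, hq]; simp; omega
    · have ih' := ih hx' (fun a ha => h a (List.mem_cons_of_mem _ ha))
      cases hq' : q a
      · cases hp' : p a <;> simp <;> omega
      · rw [h a (List.mem_cons_self ..) hq']; simp; omega

theorem bFree_add_lt (n m : Int) (v : PySem.Set (Int × Int)) (x y : Int)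
    (h1 : 0 ≤ x) (h2 : x < n) (h3 : 0 ≤ y) (h4 : y < m)
    (h5 : PySem.Set.contains v (x, y) = false) :
    bFree n m (PySem.Set.add v (x, y)) < bFree n m v := by
  unfold bFree
  refine pvFilterLenStrict _ (x, y) ((mem_bGrid n m (x, y)).2 ⟨h1, h2, h3, h4⟩)
    (by simp only [Bool.not_eq_true']; exact h5) ?_ ?_
  · have hmem : (x, y) ∈ PySem.Set.add v (x, y) :=
      (PySem.Set.mem_add v (x, y) (x, y)).2 (Or.inr rfl)
    show (!(PySem.Set.contains (PySem.Set.add v (x, y)) (x, y))) = false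
    rw [(PySem.Set.contains_iff _ (x, y)).2 hmem]
    rfl
  · intro a _ ha
    simp only [Bool.not_eq_true'] at ha ⊢
    cases hc : PySem.Set.contains v a
    · rfl
    · have hmem : a ∈ PySem.Set.add v (x, y) :=
        (PySem.Set.mem_add v (x, y) a).2 (Or.inl ((PySem.Set.contains_iff v a).1 hc))
      rw [(PySem.Set.contains_iff _ a).2 hmem] at ha
      cases ha

def bLoop (matrix : List String) (n m : Int) (cel : Option (Int × Int)) :
    List (Int × Int) → PySem.Set (Int × Int) → Int → Int
  | [], _, acc => acc
  | (x, y) :: st, v, acc =>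
    if some (x, y) = cel then bLoop matrix n m cel st v acc
    else if PySem.Set.contains v (x, y) then bLoop matrix n m cel st v acc
    else if h : 0 ≤ x ∧ x < n ∧ 0 ≤ y ∧ y < m then
      let v1 := PySem.Set.add v (x, y)
      let nbrs := (aUgr.filter (fun d =>
        bJo matrix n m (x + d.1) (y + d.2) && !(PySem.Set.contains v1 (x + d.1, y + d.2)))).map
        (fun d => (x + d.1, y + d.2))
      bLoop matrix n m cel (nbrs ++ st) v1
        (acc + (if (1 : Int) < nbrs.length then 1 else 0))
    else bLoop matrix n m cel st v acc   -- totality guard; every pushed cell is in range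
  termination_by st v _ => 5 * bFree n m v + st.length
  decreasing_by
  · simp only [List.length_cons]; omega
  · simp only [List.length_cons]; omega
  · have hlt : bFree n m (PySem.Set.add v (x, y)) < bFree n m v :=
      bFree_add_lt n m v x y h.1 h.2.1 h.2.2.1 h.2.2.2
        (by simpa using ‹¬ PySem.Set.contains v (x, y) = true›)
    have hlen : ((aUgr.filter (fun d =>
        bJo matrix n m (x + d.1) (y + d.2) && !(PySem.Set.contains (PySem.Set.add v (x, y)) (x + d.1, y + d.2)))).map
        (fun d => (x + d.1, y + d.2))).length ≤ 4 := by
      rw [List.length_map]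
      exact le_trans (List.length_filter_le _ _) (by rfl)
    simp only [List.length_append, List.length_cons]
    omega
  · simp only [List.length_cons]; omega

def countLuck_alt (matrix : List String) (k : Int) : String :=
  match matrix with
  | [] => "Oops!"             -- Python raises IndexError here (outside Pre_)
  | row0 :: _ =>
    let n : Int := matrix.length
    let m : Int := row0.toList.length
    let sc := bScan matrix n m
    match sc.1 with
    | none => "Oops!"         -- Python raises TypeError here (outside Pre_)
    | some s =>
      let total := bLoop matrix n m sc.2 [s] PySem.Set.empty 0
      if total = k then "Impressed" else "Oops!"

-- ===== PRECONDITION & SPEC =====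
-- Pre_ excludes exactly the inputs on which A raises: an empty matrix (IndexError on
-- matrix[0]), a row shorter than row 0 (IndexError in the scan), and a grid with no 'M'
-- in the scanned region (TypeError: start is None and is subscripted).
def Pre_countLuck (matrix : List String) (k : Int) : Prop :=
  matrix ≠ [] ∧
  (∀ row ∈ matrix, (matrix.headD "").toList.length ≤ row.toList.length) ∧
  (∃ row ∈ matrix, 'M' ∈ row.toList.take (matrix.headD "").toList.length)

instance (matrix : List String) (k : Int) : Decidable (Pre_countLuck matrix k) := by
  unfold Pre_countLuck; infer_instance

def pvWitness_countLuck : List String × Int := (["M.*"], 0)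

def Spec_countLuck (matrix : List String) (k : Int) (out : String) : Prop := out = countLuck_alt matrix k
instance (matrix : List String) (k : Int) (out : String) : Decidable (Spec_countLuck matrix k out) := by unfold Spec_countLuck; infer_instance

-- ===== CLAIM (what is proved, stated in full; the proofs are below) =====
def Claim_equal_countLuck : Prop := ∀ (matrix : List String) (k : Int), Dom_countLuck matrix k → Pre_countLuck matrix k → Spec_countLuck matrix k (countLuck matrix k)

-- ===== LEMMAS AND PROOFS =====

theorem bFree_le_of_sub (n m : Int) (v w : PySem.Set (Int × Int))
    (h : ∀ c, c ∈ v → c ∈ w) : bFree n m w ≤ bFree n m v := by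
  unfold bFree
  refine pvFilterLenMono _ (fun a _ ha => ?_)
  simp only [Bool.not_eq_true'] at ha ⊢
  cases hc : PySem.Set.contains v a
  · rfl
  · have haw : a ∈ w := h a ((PySem.Set.contains_iff v a).1 hc)
    rw [(PySem.Set.contains_iff w a).2 haw] at ha
    cases ha


-- one processing step of the loop, expressed on A's side
def stepA (matrix : List String) (n m : Int) (cel : Option (Int × Int)) (f : Nat)
    (x y : Int) (v : PySem.Set (Int × Int)) : Int × PySem.Set (Int × Int) :=
  if some (x, y) = cel then (0, v)
  else if PySem.Set.contains v (x, y) then (0, v)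
  else aBej matrix n m cel f x y v

def stepList (matrix : List String) (n m : Int) (cel : Option (Int × Int)) (f : Nat)
    (cells : List (Int × Int)) (v : PySem.Set (Int × Int)) : Int × PySem.Set (Int × Int) :=
  cells.foldl (fun st c =>
    (st.1 + (stepA matrix n m cel f c.1 c.2 st.2).1, (stepA matrix n m cel f c.1 c.2 st.2).2))
    ((0 : Int), v)

theorem aBej_cel (matrix : List String) (n m : Int) (cel : Option (Int × Int))
    (f : Nat) (x y : Int) (v : PySem.Set (Int × Int)) (h : some (x, y) = cel) :
    aBej matrix n m cel f x y v = (0, v) := by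
  cases f <;> simp [aBej, h]

theorem pvFoldMem {α : Type} (c : Int × Int)
    (op : (Int × PySem.Set (Int × Int)) → α → (Int × PySem.Set (Int × Int)))
    (hop : ∀ st a, c ∈ st.2 → c ∈ (op st a).2) :
    ∀ (l : List α) (st : Int × PySem.Set (Int × Int)), c ∈ st.2 → c ∈ (l.foldl op st).2 := by
  intro l
  induction l with
  | nil => intro st h; exact h
  | cons a l ih => intro st h; exact ih _ (hop st a h)

theorem mono_aBej (matrix : List String) (n m : Int) (cel : Option (Int × Int)) :
    ∀ (f : Nat) (x y : Int) (v : PySem.Set (Int × Int)) (c : Int × Int),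
      c ∈ v → c ∈ (aBej matrix n m cel f x y v).2 := by
  intro f
  induction f with
  | zero => intro x y v c hc; simpa [aBej] using hc
  | succ f ih =>
    intro x y v c hc
    simp only [aBej]
    split
    · exact hc
    · refine pvFoldMem c _ (fun st d h => ?_) aUgr _
        ((PySem.Set.mem_add v (x, y) c).2 (Or.inl hc))
      dsimp only
      split
      · exact ih _ _ _ _ h
      · exact h

theorem mono_stepA (matrix : List String) (n m : Int) (cel : Option (Int × Int))
    (f : Nat) (x y : Int) (v : PySem.Set (Int × Int)) (c : Int × Int)
    (hc : c ∈ v) : c ∈ (stepA matrix n m cel f x y v).2 := by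
  unfold stepA
  split
  · exact hc
  · split
    · exact hc
    · exact mono_aBej matrix n m cel f x y v c hc

theorem stepList_shift (matrix : List String) (n m : Int) (cel : Option (Int × Int)) (f : Nat) :
    ∀ (cells : List (Int × Int)) (p : Int × PySem.Set (Int × Int)),
    cells.foldl (fun st c =>
      (st.1 + (stepA matrix n m cel f c.1 c.2 st.2).1, (stepA matrix n m cel f c.1 c.2 st.2).2)) p
    = (p.1 + (stepList matrix n m cel f cells p.2).1, (stepList matrix n m cel f cells p.2).2) := by
  intro cells
  induction cells with
  | nil => intro p; simp [stepList]
  | cons c cells ih =>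
    intro p
    simp only [stepList, List.foldl_cons] at *
    rw [ih, ih ((0 : Int) + (stepA matrix n m cel f c.1 c.2 p.2).1,
      (stepA matrix n m cel f c.1 c.2 p.2).2)]
    refine Prod.ext ?_ ?_ <;> simp <;> ring

theorem stepList_cons (matrix : List String) (n m : Int) (cel : Option (Int × Int)) (f : Nat)
    (c : Int × Int) (cs : List (Int × Int)) (v : PySem.Set (Int × Int)) :
    stepList matrix n m cel f (c :: cs) v
    = ((stepA matrix n m cel f c.1 c.2 v).1
         + (stepList matrix n m cel f cs (stepA matrix n m cel f c.1 c.2 v).2).1,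
       (stepList matrix n m cel f cs (stepA matrix n m cel f c.1 c.2 v).2).2) := by
  calc stepList matrix n m cel f (c :: cs) v
      = cs.foldl (fun st c =>
          (st.1 + (stepA matrix n m cel f c.1 c.2 st.2).1, (stepA matrix n m cel f c.1 c.2 st.2).2))
          ((0 : Int) + (stepA matrix n m cel f c.1 c.2 v).1, (stepA matrix n m cel f c.1 c.2 v).2) := rfl
    _ = _ := by
          rw [stepList_shift matrix n m cel f cs ((0 : Int) + (stepA matrix n m cel f c.1 c.2 v).1,
            (stepA matrix n m cel f c.1 c.2 v).2)]
          refine Prod.ext ?_ ?_ <;> simp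

theorem count_foldl (p : Int × Int → Bool) :
    ∀ (l : List (Int × Int)) (i : Int),
      l.foldl (fun acc d => if p d then acc + 1 else acc) i = i + ((l.filter p).length : Int) := by
  intro l
  induction l with
  | nil => intro i; simp
  | cons a l ih =>
    intro i
    simp only [List.foldl_cons, List.filter_cons]
    cases hp : p a <;> simp [ih] <;> ring

theorem stepA_eq_aBej (matrix : List String) (n m : Int) (cel : Option (Int × Int))
    (f : Nat) (x y : Int) (v : PySem.Set (Int × Int))
    (hv : (x, y) ∉ v) :
    stepA matrix n m cel f x y v = aBej matrix n m cel f x y v := by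
  unfold stepA
  split
  · exact (aBej_cel matrix n m cel f x y v (by assumption)).symm
  · rw [if_neg (fun h => hv ((PySem.Set.contains_iff v (x, y)).1 h))]

theorem fold_deltas (matrix : List String) (n m : Int) (cel : Option (Int × Int))
    (f : Nat) (x y : Int) :
    ∀ (ds : List (Int × Int)) (v1 vcur : PySem.Set (Int × Int)) (d : Int),
    (∀ c, c ∈ v1 → c ∈ vcur) →
    ds.foldl (fun st dd =>
        if aJo matrix n m (x + dd.1) (y + dd.2) && !(PySem.Set.contains st.2 (x + dd.1, y + dd.2))
        then (st.1 + (aBej matrix n m cel f (x + dd.1) (y + dd.2) st.2).1,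
              (aBej matrix n m cel f (x + dd.1) (y + dd.2) st.2).2)
        else st) (d, vcur)
    = (d + (stepList matrix n m cel f ((ds.filter (fun dd =>
          aJo matrix n m (x + dd.1) (y + dd.2) && !(PySem.Set.contains v1 (x + dd.1, y + dd.2)))).map
          (fun dd => (x + dd.1, y + dd.2))) vcur).1,
       (stepList matrix n m cel f ((ds.filter (fun dd =>
          aJo matrix n m (x + dd.1) (y + dd.2) && !(PySem.Set.contains v1 (x + dd.1, y + dd.2)))).map
          (fun dd => (x + dd.1, y + dd.2))) vcur).2) := by
  intro ds
  induction ds with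
  | nil => intro v1 vcur d _; simp [stepList]
  | cons dd ds ih =>
    intro v1 vcur d hsub
    simp only [List.foldl_cons, List.filter_cons]
    by_cases hjo : aJo matrix n m (x + dd.1) (y + dd.2) = true
    · by_cases hvc : (x + dd.1, y + dd.2) ∈ vcur
      · -- already visited at processing time: A's fold skips this neighbour
        rw [if_neg (by simp [hjo]; exact hvc)]
        by_cases hv1 : (x + dd.1, y + dd.2) ∈ v1
        · -- and it was dropped from the neighbour list too
          rw [if_neg (by simp [hjo]; exact hv1)]
          exact ih v1 vcur d hsub
        · -- kept in the list, but stepA is a no-op on it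
          rw [if_pos (by simp [hjo]; exact hv1), List.map_cons]
          rw [ih v1 vcur d hsub, stepList_cons]
          have hstep : stepA matrix n m cel f (x + dd.1) (y + dd.2) vcur = (0, vcur) := by
            unfold stepA
            split
            · rfl
            · rw [if_pos ((PySem.Set.contains_iff vcur _).2 hvc)]
          rw [hstep]
          refine Prod.ext ?_ ?_ <;> simp
      · -- still unvisited: both sides run aBej on it
        have hv1 : (x + dd.1, y + dd.2) ∉ v1 := fun h => hvc (hsub _ h)
        rw [if_pos (by simp [hjo]; exact hvc)]
        rw [if_pos (by simp [hjo]; exact hv1), List.map_cons]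
        have hsub' : ∀ c, c ∈ v1 → c ∈ (aBej matrix n m cel f (x + dd.1) (y + dd.2) vcur).2 :=
          fun c hc => mono_aBej matrix n m cel f _ _ vcur c (hsub c hc)
        rw [ih v1 _ _ hsub', stepList_cons]
        have hstep : stepA matrix n m cel f (x + dd.1) (y + dd.2) vcur
            = aBej matrix n m cel f (x + dd.1) (y + dd.2) vcur :=
          stepA_eq_aBej matrix n m cel f _ _ vcur hvc
        rw [hstep]
        refine Prod.ext ?_ ?_ <;> simp <;> ring
    · rw [if_neg (by simp [hjo]), if_neg (by simp [hjo])]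
      exact ih v1 vcur d hsub

theorem SIMLIST (matrix : List String) (n m : Int) (cel : Option (Int × Int)) (f : Nat)
    (ih : ∀ (x y : Int) (v : PySem.Set (Int × Int)) (st : List (Int × Int)) (acc : Int),
      0 ≤ x → x < n → 0 ≤ y → y < m → bFree n m v < f →
      bLoop matrix n m cel ((x, y) :: st) v acc
        = bLoop matrix n m cel st (stepA matrix n m cel f x y v).2
            (acc + (stepA matrix n m cel f x y v).1)) :
    ∀ (cells : List (Int × Int)) (v : PySem.Set (Int × Int)) (st : List (Int × Int)) (acc : Int),
    (∀ c ∈ cells, 0 ≤ c.1 ∧ c.1 < n ∧ 0 ≤ c.2 ∧ c.2 < m) → bFree n m v < f →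
    bLoop matrix n m cel (cells ++ st) v acc
      = bLoop matrix n m cel st (stepList matrix n m cel f cells v).2
          (acc + (stepList matrix n m cel f cells v).1) := by
  intro cells
  induction cells with
  | nil => intro v st acc _ _; simp [stepList]
  | cons c cells ihl =>
    intro v st acc hr hf
    obtain ⟨cx, cy⟩ := c
    have hc := hr (cx, cy) (List.mem_cons_self ..)
    rw [List.cons_append, ih cx cy v (cells ++ st) acc hc.1 hc.2.1 hc.2.2.1 hc.2.2.2 hf]
    have hf' : bFree n m (stepA matrix n m cel f cx cy v).2 < f :=
      lt_of_le_of_lt (bFree_le_of_sub n m _ _ (fun c hc => mono_stepA matrix n m cel f cx cy v c hc)) hf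
    rw [ihl _ st _ (fun c hc => hr c (List.mem_cons_of_mem _ hc)) hf']
    rw [stepList_cons]
    congr 1 <;> simp <;> try ring

theorem SIM (matrix : List String) (n m : Int) (cel : Option (Int × Int)) :
    ∀ (f : Nat) (x y : Int) (v : PySem.Set (Int × Int)) (st : List (Int × Int)) (acc : Int),
    0 ≤ x → x < n → 0 ≤ y → y < m → bFree n m v < f →
    bLoop matrix n m cel ((x, y) :: st) v acc
      = bLoop matrix n m cel st (stepA matrix n m cel f x y v).2
          (acc + (stepA matrix n m cel f x y v).1) := by
  intro f
  induction f with
  | zero => intro x y v st acc _ _ _ _ hf; omega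
  | succ f ih =>
    intro x y v st acc hx1 hx2 hy1 hy2 hf
    by_cases hcel : some (x, y) = cel
    · rw [bLoop]
      simp [stepA, hcel]
    · by_cases hvis : (x, y) ∈ v
      · rw [bLoop]
        simp [stepA, hcel, hvis]
      · have hcont : PySem.Set.contains v (x, y) = false := by
          cases h : PySem.Set.contains v (x, y)
          · rfl
          · exact absurd ((PySem.Set.contains_iff v (x, y)).1 h) hvis
        rw [bLoop]
        rw [if_neg hcel, if_neg (by simp; exact hvis), dif_pos ⟨hx1, hx2, hy1, hy2⟩]
        rw [show bJo = aJo from rfl]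
        have hfree : bFree n m (PySem.Set.add v (x, y)) < f := by
          have := bFree_add_lt n m v x y hx1 hx2 hy1 hy2 hcont
          omega
        have hrange : ∀ c ∈ (aUgr.filter (fun d => aJo matrix n m (x + d.1) (y + d.2) &&
            !(PySem.Set.contains (PySem.Set.add v (x, y)) (x + d.1, y + d.2)))).map
            (fun d => (x + d.1, y + d.2)), 0 ≤ c.1 ∧ c.1 < n ∧ 0 ≤ c.2 ∧ c.2 < m := by
          intro c hcm
          simp only [List.mem_map, List.mem_filter] at hcm
          obtain ⟨dd, ⟨_, hdd⟩, rfl⟩ := hcm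
          simp only [aJo, Bool.and_eq_true, decide_eq_true_eq] at hdd
          exact ⟨hdd.1.1.1.1.1, hdd.1.1.1.1.2, hdd.1.1.1.2, hdd.1.1.2⟩
        rw [SIMLIST matrix n m cel f ih _ _ st _ hrange hfree]
        rw [stepA_eq_aBej matrix n m cel (f + 1) x y v hvis]
        simp only [aBej, hcel]
        rw [count_foldl]
        rw [fold_deltas matrix n m cel f x y aUgr (PySem.Set.add v (x, y))
          (PySem.Set.add v (x, y)) _ (fun c h => h)]
        congr 1 <;> simp <;> ring

theorem pvFoldInv {α β : Type} {P : β → Prop} (f : β → α → β) :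
    ∀ (l : List α) (b : β), P b → (∀ b a, a ∈ l → P b → P (f b a)) → P (l.foldl f b) := by
  intro l
  induction l with
  | nil => intro b hb _; exact hb
  | cons a l ih =>
    intro b hb hs
    exact ih _ (hs b a (List.mem_cons_self ..) hb)
      (fun b a' ha' hb' => hs b a' (List.mem_cons_of_mem _ ha') hb')

theorem len_bGrid (n m : Int) : (bGrid n m).length = n.toNat * m.toNat := by
  simp [bGrid, List.length_flatMap, PySem.List.length_pyRange_one]

theorem aScan_fst_range (matrix : List String) (n m : Int) :
    ∀ (s : Int × Int), (aScan matrix n m).1 = some s →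
      0 ≤ s.1 ∧ s.1 < n ∧ 0 ≤ s.2 ∧ s.2 < m := by
  unfold aScan
  refine pvFoldInv (P := fun (st : Option (Int × Int) × Option (Int × Int)) =>
    ∀ s : Int × Int, st.1 = some s → 0 ≤ s.1 ∧ s.1 < n ∧ 0 ≤ s.2 ∧ s.2 < m) _ _ _ ?_ ?_
  · intro s h; cases h
  · intro b xx hxx hb
    refine pvFoldInv (P := fun (st : Option (Int × Int) × Option (Int × Int)) =>
      ∀ s : Int × Int, st.1 = some s → 0 ≤ s.1 ∧ s.1 < n ∧ 0 ≤ s.2 ∧ s.2 < m) _ _ _ hb ?_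
    intro b2 yy hyy hb2
    intro s hs
    have hx := (PySem.List.mem_pyRange_one.1 hxx)
    have hy := (PySem.List.mem_pyRange_one.1 hyy)
    split at hs
    · obtain rfl : (xx, yy) = s := Option.some.inj hs
      exact ⟨by omega, by omega, by omega, by omega⟩
    · split at hs
      · exact hb2 s hs
      · exact hb2 s hs

-- ===== VERDICT (by name: the statement is the Claim_ definition above) =====
theorem countLuck_spec : Claim_equal_countLuck := by
  intro matrix k _ _
  unfold Spec_countLuck
  cases matrix with
  | nil => rfl
  | cons row0 rest =>
    simp only [countLuck, countLuck_alt]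
    rw [show bScan = aScan from rfl]
    cases hsc : (aScan (row0 :: rest) ((row0 :: rest : List String).length : Int)
        ((row0.toList.length : Nat) : Int)).1 with
    | none => simp [hsc]
    | some s =>
      simp only [hsc]
      obtain ⟨sx, sy⟩ := s
      have hr := aScan_fst_range (row0 :: rest) _ _ _ hsc
      have hfree : bFree ((row0 :: rest : List String).length : Int) ((row0.toList.length : Nat) : Int)
          PySem.Set.empty
          < ((row0 :: rest : List String).length : Int).toNat * ((row0.toList.length : Nat) : Int).toNat + 1 := by
        have h1 : bFree ((row0 :: rest : List String).length : Int) ((row0.toList.length : Nat) : Int)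
            PySem.Set.empty
            ≤ (bGrid ((row0 :: rest : List String).length : Int) ((row0.toList.length : Nat) : Int)).length :=
          List.length_filter_le _ _
        rw [len_bGrid] at h1
        omega
      rw [SIM (row0 :: rest) _ _ _ _ sx sy PySem.Set.empty [] 0 hr.1 hr.2.1 hr.2.2.1 hr.2.2.2 hfree]
      rw [stepA_eq_aBej _ _ _ _ _ sx sy PySem.Set.empty (by simp [PySem.Set.empty])]
      rw [bLoop]
      simp
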